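-- pv_equiv track=rewrite | github.com/daniel-reich/ubiquitous-fiesta | 6brSyFwWnb9Msu7kX_8.py | pos_neg_sort
-- ===== SOURCE A (Python) =====
-- def pos_neg_sort(lst):
--   pos = sorted([i for i in lst if i > 0])
--   it = 0
--   for i in range(len(lst)):
--     if lst[i] > 0:
--       lst[i] = pos[it]
--       it += 1
--   return lst
-- ===== SOURCE B (Python) =====
-- def pos_neg_sort(lst):
--   ps = []
--   for x in lst:
--     if x > 0:
--       j = len(ps)
--       while j > 0 and ps[j - 1] > x:
--         j -= 1
--       ps.insert(j, x)
--   it = iter(ps)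
--   lst[:] = [next(it) if x > 0 else x for x in lst]
--   return lst
-- ===== Notes on version B (the rewrite author's own statement) =====
-- stated objective: alternative
-- what changed: B replaces the library sorted() call by a hand-written binary-insertion-style insertion sort built element by element, and replaces A's second indexed scan with a running counter by an iterator-driven list rebuild assigned back through lst[:].
import Mathlib
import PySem

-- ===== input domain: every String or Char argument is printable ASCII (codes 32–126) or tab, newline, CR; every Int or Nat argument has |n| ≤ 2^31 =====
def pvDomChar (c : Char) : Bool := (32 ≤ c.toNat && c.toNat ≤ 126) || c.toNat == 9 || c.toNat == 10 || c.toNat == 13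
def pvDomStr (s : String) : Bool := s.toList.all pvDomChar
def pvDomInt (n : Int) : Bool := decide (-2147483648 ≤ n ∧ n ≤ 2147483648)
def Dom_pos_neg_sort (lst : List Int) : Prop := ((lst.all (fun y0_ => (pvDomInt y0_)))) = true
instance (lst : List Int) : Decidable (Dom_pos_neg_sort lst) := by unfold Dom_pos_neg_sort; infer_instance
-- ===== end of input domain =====

-- B sorts the positive values with a hand-written insertion sort (no library sort) and rebuilds
-- the list through an iterator instead of A's indexed scan with a running counter (alternative
-- decomposition, not faster; both Pythons mutate lst in place — the equivalence proved is about
-- the return value).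


-- ===== PORT A =====
-- A's loop body (for i in range(len(lst)): if lst[i] > 0: lst[i] = pos[it]; it += 1);
-- pos[it] is ported with pyGetD: it is always in range (pos holds one value per positive entry).
def pvStepA (pos : List Int) (st : List Int × Int) (i : Int) : List Int × Int :=
  if PySem.List.pyGetD st.1 i 0 > 0 then
    (PySem.List.pySetD st.1 i (PySem.List.pyGetD pos st.2 0), st.2 + 1)
  else st

def pos_neg_sort (lst : List Int) : List Int :=
  let pos := PySem.List.sorted (lst.filter (fun i => decide (i > 0))) (fun x => x) false
  ((PySem.List.pyRange 0 (PySem.List.len lst) 1).foldl (pvStepA pos) (lst, 0)).1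

-- ===== PORT B =====
-- B's inner while loop: j starts at len(ps) and is decremented while j > 0 and ps[j-1] > x;
-- ps[j-1] is ported with pyGetD (always in range: 0 < j ≤ len ps).
def pvInsPos (ps : List Int) (x : Int) : Nat → Nat
  | 0 => 0
  | j + 1 => if PySem.List.pyGetD ps (j : Int) 0 > x then pvInsPos ps x j else j + 1

-- B's first loop body: if x > 0: find j, ps.insert(j, x)
def pvStepIns (ps : List Int) (x : Int) : List Int :=
  if x > 0 then PySem.List.insert ps ((pvInsPos ps x ps.length : Nat) : Int) x else ps

-- B's rebuild '[next(it) if x > 0 else x for x in lst]': the iterator is the remaining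
-- suffix of ps; next(it) never exhausts it (one sorted value per positive entry).
def pvFillIt : List Int → List Int → List Int
  | [], _ => []
  | x :: xs, ps => if x > 0 then ps.headD 0 :: pvFillIt xs ps.tail else x :: pvFillIt xs ps

def pos_neg_sort_alt (lst : List Int) : List Int :=
  let ps := lst.foldl pvStepIns []
  pvFillIt lst ps

-- ===== PRECONDITION & SPEC =====
def Spec_pos_neg_sort (lst : List Int) (out : List Int) : Prop := out = pos_neg_sort_alt lst
instance (lst : List Int) (out : List Int) : Decidable (Spec_pos_neg_sort lst out) := by unfold Spec_pos_neg_sort; infer_instance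

-- ===== CLAIM (what is proved, stated in full; the proofs are below) =====
def Claim_equal_pos_neg_sort : Prop := ∀ (lst : List Int), Dom_pos_neg_sort lst → Spec_pos_neg_sort lst (pos_neg_sort lst)

-- ===== LEMMAS AND PROOFS =====

theorem pvFillIt_append (ys zs ps : List Int) :
    pvFillIt (ys ++ zs) ps = pvFillIt ys ps ++ pvFillIt zs (ps.drop (ys.countP (fun x => decide (x > 0)))) := by
  induction ys generalizing ps with
  | nil => simp [pvFillIt]
  | cons y ys ih =>
    by_cases hy : y > 0
    · simp [pvFillIt, hy, ih]
    · simp [pvFillIt, hy, ih]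

theorem pvLenFill (l ps : List Int) : (pvFillIt l ps).length = l.length := by
  induction l generalizing ps with
  | nil => simp [pvFillIt]
  | cons x xs ih => by_cases hx : x > 0 <;> simp [pvFillIt, hx, ih]

theorem pvFoldA_append (ps : List Int) (L : List Int) (l zs : List Int) (it : Int)
    (h : ∀ i ∈ L, 0 ≤ i ∧ i < (l.length : Int)) :
    L.foldl (pvStepA ps) (l ++ zs, it)
      = ((L.foldl (pvStepA ps) (l, it)).1 ++ zs, (L.foldl (pvStepA ps) (l, it)).2) := by
  induction L generalizing l it with
  | nil => simp
  | cons i L ih =>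
    obtain ⟨h0, hlt⟩ := h i (by simp)
    have hnat : i.toNat < l.length := by omega
    simp only [List.foldl_cons, pvStepA,
      PySem.List.pyGetD_of_nonneg _ _ h0, PySem.List.pySetD_of_nonneg _ _ h0]
    rw [show (l ++ zs).getD i.toNat 0 = l.getD i.toNat 0 by
      simp [List.getD, List.getElem?_append_left hnat]]
    split_ifs
    · rw [List.set_append_left _ _ hnat]
      rw [ih _ _ (fun j hj => by
        have := h j (by simp [hj]); simpa [List.length_set] using this)]
    · exact ih _ _ (fun j hj => h j (by simp [hj]))

theorem pvMainA (ps : List Int) (l : List Int) (it : Int) (hit : 0 ≤ it) :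
    (PySem.List.pyRange 0 (l.length : Int) 1).foldl (pvStepA ps) (l, it)
      = (pvFillIt l (ps.drop it.toNat), it + (l.countP (fun x => decide (x > 0)) : Int)) := by
  induction l using List.reverseRecOn with
  | nil => simp [PySem.List.pyRange_one_eq_nil (le_refl 0), pvFillIt]
  | append_singleton ys x ih =>
    have hcast : ((ys ++ [x]).length : Int) = (ys.length : Int) + 1 := by simp
    rw [hcast, PySem.List.pyRange_one_succ_right (by positivity), List.foldl_append]
    rw [pvFoldA_append ps _ ys [x] it (fun i hi => by
      rw [PySem.List.mem_pyRange_one] at hi; exact hi)]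
    rw [ih]
    simp only [List.foldl_cons, List.foldl_nil, pvStepA]
    have hr : (pvFillIt ys (ps.drop it.toNat)).length = ys.length := pvLenFill _ _
    have h0 : (0:Int) ≤ (ys.length : Int) := by positivity
    rw [PySem.List.pyGetD_of_nonneg _ _ h0]
    have htoNat : ((ys.length : Int)).toNat = ys.length := by omega
    rw [htoNat]
    rw [show (pvFillIt ys (ps.drop it.toNat) ++ [x]).getD ys.length 0 = x by
      rw [← hr]; simp [List.getD]]
    rw [pvFillIt_append]
    by_cases hx : x > 0
    · simp only [hx, if_pos]
      rw [PySem.List.pySetD_of_nonneg _ _ h0, htoNat, ← hr,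
        List.set_append_right _ _ (le_refl _)]
      have hget : PySem.List.pyGetD ps (it + (ys.countP (fun x => decide (x > 0)) : Int)) 0
          = ((ps.drop it.toNat).drop (ys.countP (fun x => decide (x > 0)))).headD 0 := by
        rw [PySem.List.pyGetD_of_nonneg _ _ (by positivity)]
        simp [List.getD, List.head?_drop, List.drop_drop]
        congr 2
        omega
      rw [hget]
      simp [pvFillIt, hx, List.countP_append]
      omega
    · simp only [hx]
      simp [pvFillIt, hx, List.countP_append]

-- ---- B side: the hand-written insertion sort returns the sorted list ----

theorem pvInsPos_le (ps : List Int) (x : Int) (j : Nat) : pvInsPos ps x j ≤ j := by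
  induction j with
  | zero => simp [pvInsPos]
  | succ j ih =>
    unfold pvInsPos
    split_ifs
    · omega
    · omega

-- characterisation of the while loop's stopping position
theorem pvInsPos_spec (ps : List Int) (x : Int) (j : Nat) (hj : j ≤ ps.length) :
    (∀ k : Nat, pvInsPos ps x j ≤ k → k < j → ps.getD k 0 > x) ∧
    (0 < pvInsPos ps x j → ¬ ps.getD (pvInsPos ps x j - 1) 0 > x) := by
  induction j with
  | zero => simp [pvInsPos]
  | succ j ih =>
    have ih' := ih (by omega)
    unfold pvInsPos
    split_ifs with h
    · rw [PySem.List.pyGetD_natCast] at h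
      refine ⟨fun k hk1 hk2 => ?_, ih'.2⟩
      by_cases hkj : k < j
      · exact ih'.1 k hk1 hkj
      · have : k = j := by omega
        subst this; exact h
    · rw [PySem.List.pyGetD_natCast] at h
      exact ⟨fun k hk1 hk2 => by omega, fun _ => by simpa using h⟩

theorem pvStepIns_eq (ps : List Int) (x : Int) (h : x > 0) :
    pvStepIns ps x = ps.take (pvInsPos ps x ps.length) ++ x :: ps.drop (pvInsPos ps x ps.length) := by
  unfold pvStepIns
  rw [if_pos h, PySem.List.insert_natCast ps _ x (pvInsPos_le ps x ps.length)]

theorem pvStepIns_perm (ps : List Int) (x : Int) (h : x > 0) :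
    (pvStepIns ps x).Perm (x :: ps) := by
  rw [pvStepIns_eq ps x h]
  calc (ps.take (pvInsPos ps x ps.length) ++ x :: ps.drop (pvInsPos ps x ps.length)).Perm
        (x :: (ps.take (pvInsPos ps x ps.length) ++ ps.drop (pvInsPos ps x ps.length))) :=
        List.perm_middle
    _ = (x :: ps) := by rw [List.take_append_drop]

theorem pvStepIns_pairwise (ps : List Int) (x : Int) (hps : ps.Pairwise (· ≤ ·)) :
    (pvStepIns ps x).Pairwise (· ≤ ·) := by
  by_cases h : x > 0
  · rw [pvStepIns_eq ps x h]
    set p := pvInsPos ps x ps.length with hp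
    obtain ⟨hafter, hbefore⟩ := pvInsPos_spec ps x ps.length (le_refl _)
    have hple : p ≤ ps.length := pvInsPos_le ps x ps.length
    have hsortedElem : ∀ (a b : Nat), (hab : a ≤ b) → (hb : b < ps.length) → ps[a]'(by omega) ≤ ps[b] := by
      intro a b hab hb
      rcases Nat.lt_or_ge a b with hlt | hge
      · exact List.pairwise_iff_getElem.mp hps a b (by omega) hb hlt
      · have : a = b := by omega
        subst this; exact le_refl _
    have hgt : ∀ (k : Nat) (hk : k < ps.length), p ≤ k → x < ps[k] := by
      intro k hk hpk
      have := hafter k hpk hk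
      rw [List.getD_eq_getElem?_getD, List.getElem?_eq_getElem hk] at this
      simpa using this
    have hlex : ∀ (k : Nat) (hk : k < ps.length), k < p → ps[k] ≤ x := by
      intro k hk hkp
      have hp0 : 0 < p := by omega
      have h1 := hbefore hp0
      rw [List.getD_eq_getElem?_getD,
        List.getElem?_eq_getElem (by omega : p - 1 < ps.length)] at h1
      simp at h1
      have h2 : ps[k] ≤ ps[p-1]'(by omega) := hsortedElem k (p-1) (by omega) (by omega)
      omega
    rw [List.pairwise_append]
    refine ⟨hps.sublist (List.take_sublist _ _), ?_, ?_⟩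
    · rw [List.pairwise_cons]
      refine ⟨?_, hps.sublist (List.drop_sublist _ _)⟩
      intro b hb
      rw [List.mem_iff_getElem] at hb
      obtain ⟨k, hk, rfl⟩ := hb
      have hk' : p + k < ps.length := by rw [List.length_drop] at hk; omega
      rw [List.getElem_drop]
      exact le_of_lt (hgt (p + k) hk' (by omega))
    · intro a ha b hb
      rw [List.mem_iff_getElem] at ha
      obtain ⟨k, hk, rfl⟩ := ha
      have hk' : k < p ∧ k < ps.length := by
        rw [List.length_take] at hk; omega
      rw [List.getElem_take]
      have hax : ps[k]'hk'.2 ≤ x := hlex k hk'.2 hk'.1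
      rcases List.mem_cons.mp hb with rfl | hb
      · exact hax
      · rw [List.mem_iff_getElem] at hb
        obtain ⟨m, hm, rfl⟩ := hb
        have hm' : p + m < ps.length := by rw [List.length_drop] at hm; omega
        rw [List.getElem_drop]
        exact le_of_lt (lt_of_le_of_lt hax (hgt (p + m) hm' (by omega)))
  · simpa [pvStepIns, h] using hps

theorem pvFold_perm (ys acc : List Int) (hpos : ∀ y ∈ ys, y > 0) :
    (ys.foldl pvStepIns acc).Perm (ys ++ acc) := by
  induction ys generalizing acc with
  | nil => simp
  | cons y ys ih =>
    simp only [List.foldl_cons]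
    have h1 : (ys.foldl pvStepIns (pvStepIns acc y)).Perm (ys ++ pvStepIns acc y) :=
      ih _ (fun z hz => hpos z (by simp [hz]))
    have h2 : (ys ++ pvStepIns acc y).Perm (ys ++ y :: acc) :=
      List.Perm.append_left ys (pvStepIns_perm acc y (hpos y (by simp)))
    exact (h1.trans h2).trans List.perm_middle

theorem pvFold_pairwise (ys acc : List Int) (hacc : acc.Pairwise (· ≤ ·)) :
    (ys.foldl pvStepIns acc).Pairwise (· ≤ ·) := by
  induction ys generalizing acc with
  | nil => simpa
  | cons y ys ih => exact ih _ (pvStepIns_pairwise acc y hacc)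

-- the guarded fold over lst equals the fold over its positive elements
theorem pvFold_filter (l acc : List Int) :
    l.foldl pvStepIns acc = (l.filter (fun x => decide (x > 0))).foldl pvStepIns acc := by
  induction l generalizing acc with
  | nil => rfl
  | cons x xs ih =>
    by_cases hx : x > 0
    · simp only [List.foldl_cons, List.filter_cons, hx, decide_true, if_true]
      exact ih _
    · simp only [List.foldl_cons, List.filter_cons, hx, decide_false]
      rw [show pvStepIns acc x = acc by simp [pvStepIns, hx]]
      exact ih _

theorem pvSort_eq (l : List Int) :
    PySem.List.sorted (l.filter (fun i => decide (i > 0))) (fun x => x) false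
      = l.foldl pvStepIns [] := by
  rw [pvFold_filter]
  set ys := l.filter (fun i => decide (i > 0)) with hys
  have hpos : ∀ y ∈ ys, y > 0 := by
    intro y hy
    rw [hys, List.mem_filter] at hy
    simpa using hy.2
  have hperm : (ys.foldl pvStepIns []).Perm ys := by
    simpa using pvFold_perm ys [] hpos
  have hpw : (ys.foldl pvStepIns []).Pairwise (· ≤ ·) := pvFold_pairwise ys [] (by simp)
  exact PySem.List.sorted_id_eq_of_perm_of_pairwise ys (ys.foldl pvStepIns []) hperm hpw

-- ===== VERDICT (by name: the statement is the Claim_ definition above) =====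
theorem pos_neg_sort_spec : Claim_equal_pos_neg_sort := by
  intro lst _
  unfold Spec_pos_neg_sort pos_neg_sort pos_neg_sort_alt
  simp only
  rw [← pvSort_eq lst]
  rw [PySem.List.len_eq, pvMainA _ lst 0 (le_refl 0)]
  simp
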